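-- pv_equiv track=rewrite | github.com/bigdata97/automation | getdependency.py | find_matching_files
-- ===== SOURCE A (Python) =====
-- def find_matching_files(imports, all_py_files):
--     matched_files = []
--
--     for module in imports:
--         expected_path = module.replace(".", "/") + ".py"
--         for f in all_py_files:
--             if f.endswith(expected_path):
--                 matched_files.append(f)
--                 break
--     return matched_files
-- ===== SOURCE B (Python) =====
-- def find_matching_files(imports, all_py_files):
--     # Build a suffix index once: every suffix of every file -> first file (in
--     # original order) having that suffix.  Each import is then one dict lookup.
--     index = {}
--     for f in all_py_files:
--         for i in range(len(f) + 1):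
--             suffix = f[i:]
--             if suffix not in index:
--                 index[suffix] = f
--     matched_files = []
--     for module in imports:
--         expected_path = module.replace(".", "/") + ".py"
--         f = index.get(expected_path)
--         if f is not None:
--             matched_files.append(f)
--     return matched_files
-- ===== Notes on version B (the rewrite author's own statement) =====
-- stated objective: faster
-- what changed: B builds a suffix index (dict from every suffix of every file to the first such file) once, then answers each import with a single dict lookup, instead of A's per-import linear endswith scan over all files.
import Mathlib
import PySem

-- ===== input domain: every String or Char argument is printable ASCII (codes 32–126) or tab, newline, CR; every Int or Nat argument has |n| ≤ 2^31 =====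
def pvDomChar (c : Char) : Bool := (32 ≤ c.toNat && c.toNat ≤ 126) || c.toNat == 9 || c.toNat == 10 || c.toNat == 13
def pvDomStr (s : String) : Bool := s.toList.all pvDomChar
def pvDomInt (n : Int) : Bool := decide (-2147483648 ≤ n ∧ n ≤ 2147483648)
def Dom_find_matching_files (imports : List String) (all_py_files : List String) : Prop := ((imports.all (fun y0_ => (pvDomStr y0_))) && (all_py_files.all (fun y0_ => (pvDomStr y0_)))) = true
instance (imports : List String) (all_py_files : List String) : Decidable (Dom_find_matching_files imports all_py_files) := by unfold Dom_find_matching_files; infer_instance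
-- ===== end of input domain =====

-- B replaces A's per-import scan over all files by a suffix index built once
-- (every suffix of every file -> first such file), one lookup per import;
-- objective: faster when there are many imports.

-- ===== PORT A =====
-- A's inner 'for f in all_py_files: if f.endswith(ep): append; break'
def pvFirstMatch (all_py_files : List String) (expected_path : String) : Option String :=
  match all_py_files with
  | [] => none
  | f :: rest =>
      if PySem.Str.endswith f expected_path then some f else pvFirstMatch rest expected_path

def find_matching_files (imports : List String) (all_py_files : List String) : List String :=
  imports.foldl (fun matched_files module =>
    let expected_path := PySem.Str.replace module "." "/" ++ ".py"
    match pvFirstMatch all_py_files expected_path with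
    | some f => matched_files ++ [f]
    | none => matched_files) []

-- ===== PORT B =====
-- Source B's index-building loop: for i in range(len(f)+1): if f[i:] not in index: index[f[i:]] = f
def pvAddSuffixes (index : PySem.Dict String String) (f : String) : PySem.Dict String String :=
  (PySem.List.pyRange 0 (PySem.Str.len f + 1) 1).foldl (fun index i =>
    let suffix := PySem.Str.slice f (some i) none
    if index.contains suffix then index else index.insert suffix f) index

def find_matching_files_alt (imports : List String) (all_py_files : List String) : List String :=
  let index := all_py_files.foldl pvAddSuffixes PySem.Dict.empty
  imports.foldl (fun matched_files module =>
    let expected_path := PySem.Str.replace module "." "/" ++ ".py"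
    match index.get? expected_path with
    | some f => matched_files ++ [f]
    | none => matched_files) []

-- ===== PRECONDITION & SPEC =====
def Spec_find_matching_files (imports : List String) (all_py_files : List String) (out : List String) : Prop := out = find_matching_files_alt imports all_py_files
instance (imports : List String) (all_py_files : List String) (out : List String) : Decidable (Spec_find_matching_files imports all_py_files out) := by unfold Spec_find_matching_files; infer_instance

-- ===== CLAIM (what is proved, stated in full; the proofs are below) =====
def Claim_equal_find_matching_files : Prop := ∀ (imports : List String) (all_py_files : List String), Dom_find_matching_files imports all_py_files → Spec_find_matching_files imports all_py_files (find_matching_files imports all_py_files)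

-- ===== LEMMAS AND PROOFS =====

lemma pvOrElse_none (o : Option String) : (o.orElse fun _ => none) = o := by cases o <;> rfl

lemma pvOrElse_assoc (a b c : Option String) :
    ((a.orElse fun _ => b).orElse fun _ => c) = a.orElse fun _ => (b.orElse fun _ => c) := by
  cases a <;> rfl

lemma pvEndswith_iff (f s : String) : PySem.Str.endswith f s = true ↔ s.toList <:+ f.toList := by
  simp [PySem.Str.endswith, PySem.Chars.endswith_iff]

-- the suffixes Source B enumerates (f[i:] for i in range(len(f)+1)) are exactly the suffixes of f
lemma pvMem_suffix_range (f s : String) :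
    (∃ i ∈ PySem.List.pyRange 0 (PySem.Str.len f + 1) 1, s = PySem.Str.slice f (some i) none)
      ↔ s.toList <:+ f.toList := by
  constructor
  · rintro ⟨i, hi, rfl⟩
    have h0 : 0 ≤ i := (PySem.List.mem_pyRange_one.mp hi).1
    have : (PySem.Str.slice f (some i) none).toList = f.toList.drop i.toNat := by
      simp [PySem.List.slice_from _ h0]
    rw [this]
    exact List.drop_suffix _ _
  · rintro ⟨t, ht⟩
    refine ⟨(t.length : Int), ?_, ?_⟩
    · rw [PySem.List.mem_pyRange_one]
      constructor
      · positivity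
      · have : t.length ≤ f.toList.length := by rw [← ht]; simp
        simp only [PySem.Str.len_eq]
        omega
    · apply String.toList_inj.mp
      simp [PySem.List.slice_from _ (by positivity : (0:Int) ≤ (t.length : Int)), ← ht]

-- lookup after Source B's setdefault-style inner loop over a list of positions
lemma pvGet?_foldl_setdefault (is : List Int) (f : String) (d : PySem.Dict String String) (s : String) :
    ((is.foldl (fun index i =>
        let suffix := PySem.Str.slice f (some i) none
        if index.contains suffix then index else index.insert suffix f) d).get? s)
      = ((d.get? s).orElse (fun _ => if ∃ i ∈ is, s = PySem.Str.slice f (some i) none then some f else none)) := by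
  induction is generalizing d with
  | nil => simp only [List.foldl_nil, List.not_mem_nil, false_and, exists_false, if_false,
      pvOrElse_none]
  | cons i is ih =>
    rw [List.foldl_cons, ih]
    have hstep : ((if d.contains (PySem.Str.slice f (some i) none) then d
        else d.insert (PySem.Str.slice f (some i) none) f).get? s)
        = (d.get? s).orElse (fun _ => if s = PySem.Str.slice f (some i) none then some f else none) := by
      by_cases hc : d.contains (PySem.Str.slice f (some i) none) = true
      · rw [if_pos hc]
        by_cases hs : s = PySem.Str.slice f (some i) none
        · rw [if_pos hs]
          rw [PySem.Dict.contains_eq_isSome_get?] at hc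
          rw [← hs] at hc
          rcases h : d.get? s with _ | v
          · rw [h] at hc; simp at hc
          · rfl
        · rw [if_neg hs, pvOrElse_none]
      · rw [if_neg hc, PySem.Dict.get?_insert]
        by_cases hs : s = PySem.Str.slice f (some i) none
        · rw [if_pos hs, if_pos hs]
          rw [PySem.Dict.contains_eq_isSome_get?, ← hs] at hc
          rcases h : d.get? s with _ | v
          · rfl
          · rw [h] at hc; simp at hc
        · rw [if_neg hs, if_neg hs, pvOrElse_none]
    show ((if d.contains (PySem.Str.slice f (some i) none) then d
        else d.insert (PySem.Str.slice f (some i) none) f).get? s).orElse _ = _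
    rw [hstep, pvOrElse_assoc]
    congr 1
    funext _
    by_cases hs : s = PySem.Str.slice f (some i) none
    · rw [if_pos hs, if_pos (show ∃ j ∈ i :: is, s = PySem.Str.slice f (some j) none from ⟨i, by simp, hs⟩)]
      rfl
    · rw [if_neg hs]
      by_cases he : ∃ j ∈ is, s = PySem.Str.slice f (some j) none
      · rw [if_pos he, if_pos (by rcases he with ⟨j, hj, hsj⟩; exact ⟨j, List.mem_cons_of_mem _ hj, hsj⟩)]
        rfl
      · have hne : ¬ ∃ j ∈ i :: is, s = PySem.Str.slice f (some j) none := by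
          rintro ⟨j, hj, hsj⟩
          rcases List.mem_cons.mp hj with rfl | hj'
          · exact hs hsj
          · exact he ⟨j, hj', hsj⟩
        rw [if_neg he, if_neg hne]
        rfl

lemma pvGet?_addSuffixes (d : PySem.Dict String String) (f s : String) :
    (pvAddSuffixes d f).get? s
      = (d.get? s).orElse (fun _ => if PySem.Str.endswith f s then some f else none) := by
  unfold pvAddSuffixes
  rw [pvGet?_foldl_setdefault]
  congr 1
  funext _
  by_cases h : PySem.Str.endswith f s = true
  · rw [if_pos ((pvMem_suffix_range f s).mpr ((pvEndswith_iff f s).mp h)), if_pos h]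
  · rw [if_neg (fun hex => h ((pvEndswith_iff f s).mpr ((pvMem_suffix_range f s).mp hex))), if_neg h]

lemma pvGet?_index (all_py_files : List String) (d : PySem.Dict String String) (s : String) :
    (all_py_files.foldl pvAddSuffixes d).get? s
      = (d.get? s).orElse (fun _ => pvFirstMatch all_py_files s) := by
  induction all_py_files generalizing d with
  | nil => rw [List.foldl_nil]; exact (pvOrElse_none _).symm
  | cons f fs ih =>
    rw [List.foldl_cons, ih, pvGet?_addSuffixes, pvOrElse_assoc]
    congr 1
    funext _
    show ((if PySem.Str.endswith f s then some f else none).orElse fun _ => pvFirstMatch fs s)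
      = pvFirstMatch (f :: fs) s
    rw [show pvFirstMatch (f :: fs) s
        = if PySem.Str.endswith f s then some f else pvFirstMatch fs s from rfl]
    by_cases h : PySem.Str.endswith f s = true
    · rw [if_pos h, if_pos h]; rfl
    · rw [if_neg h, if_neg h]; rfl

lemma pvGet?_index_empty (all_py_files : List String) (s : String) :
    (all_py_files.foldl pvAddSuffixes PySem.Dict.empty).get? s = pvFirstMatch all_py_files s := by
  rw [pvGet?_index]
  rfl

-- ===== VERDICT (by name: the statement is the Claim_ definition above) =====
theorem find_matching_files_spec : Claim_equal_find_matching_files := by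
  intro imports all_py_files _
  unfold Spec_find_matching_files find_matching_files find_matching_files_alt
  simp only [pvGet?_index_empty]
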